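-- pv_equiv track=rewrite | github.com/JustinTime42/stanley | src/cli/input/parser.py | strip_continuation
-- ===== SOURCE A (Python) =====
-- def strip_continuation(text: str) -> str:
--     """
--     Remove continuation markers from text.
--
--     Args:
--         text: Input text with potential continuation markers
--
--     Returns:
--         Cleaned text
--     """
--     # Remove trailing backslash continuations
--     lines = text.split("\n")
--     cleaned = []
--     for line in lines:
--         if line.endswith("\\"):
--             cleaned.append(line[:-1])
--         else:
--             cleaned.append(line)
--     return "\n".join(cleaned)
-- ===== SOURCE B (Python) =====
-- def strip_continuation(text: str) -> str:
--     """Single character-level pass: drop a backslash exactly where a line ends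
--     (before a newline or at end of string); no line list is built."""
--     out = []
--     n = len(text)
--     for i, c in enumerate(text):
--         if c == "\\" and (i + 1 == n or text[i + 1] == "\n"):
--             continue
--         out.append(c)
--     return "".join(out)
-- ===== Notes on version B (the rewrite author's own statement) =====
-- stated objective: alternative
-- what changed: Replaced the split-into-lines / per-line endswith-strip / join pipeline with one character-level pass that drops a backslash exactly when the following character is a line break or the string ends.
import Mathlib
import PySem

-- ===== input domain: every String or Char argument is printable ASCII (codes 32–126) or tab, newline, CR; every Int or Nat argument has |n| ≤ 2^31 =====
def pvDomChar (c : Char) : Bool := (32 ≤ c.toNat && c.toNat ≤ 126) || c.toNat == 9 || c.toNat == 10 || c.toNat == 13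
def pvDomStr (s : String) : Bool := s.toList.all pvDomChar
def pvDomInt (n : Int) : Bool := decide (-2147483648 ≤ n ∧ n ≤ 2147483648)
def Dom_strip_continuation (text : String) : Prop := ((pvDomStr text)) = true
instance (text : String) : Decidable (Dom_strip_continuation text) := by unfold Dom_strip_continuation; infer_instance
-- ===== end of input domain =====

-- B is a single character-level pass (drop '\' before a newline or at end of string)
-- instead of A's split/per-line-strip/join; an alternative of the same cost, not faster.

-- ===== PORT A =====
-- split("\n"), per-line endswith("\\") → line[:-1], then "\n".join — step for step.
def strip_continuation (text : String) : String :=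
  let lines := PySem.Chars.splitOn text.toList ['\n']
  let cleaned := lines.foldl
    (fun acc line =>
      acc ++ [if PySem.Chars.endswith line ['\\'] then PySem.Chars.slice line none (some (-1)) else line])
    ([] : List (List Char))
  String.ofList (PySem.Chars.join ['\n'] cleaned)

-- ===== PORT B =====
-- Source B's loop over characters with one-character lookahead, as structural recursion.
def stripContAltGo : List Char → List Char
  | [] => []
  | c :: rest =>
    if c = '\\' ∧ (rest = [] ∨ rest.head? = some '\n') then stripContAltGo rest
    else c :: stripContAltGo rest

def strip_continuation_alt (text : String) : String :=
  String.ofList (stripContAltGo text.toList)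

-- ===== PRECONDITION & SPEC =====
def Spec_strip_continuation (text : String) (out : String) : Prop := out = strip_continuation_alt text
instance (text : String) (out : String) : Decidable (Spec_strip_continuation text out) := by unfold Spec_strip_continuation; infer_instance

-- ===== CLAIM (what is proved, stated in full; the proofs are below) =====
def Claim_equal_strip_continuation : Prop := ∀ (text : String), Dom_strip_continuation text → Spec_strip_continuation text (strip_continuation text)

-- ===== LEMMAS AND PROOFS =====

-- Reference recursion for splitOn · ['\n'] (proof-side only).
def stripContSp : List Char → List (List Char)
  | [] => [[]]
  | c :: s => if c = '\n' then [] :: stripContSp s else (stripContSp s).modifyHead (c :: ·)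

theorem stripContSp_ne_nil (l : List Char) : stripContSp l ≠ [] := by
  induction l with
  | nil => simp [stripContSp]
  | cons c s ih =>
    simp only [stripContSp]
    split_ifs
    · simp
    · obtain ⟨p, ps, hps⟩ := List.exists_cons_of_ne_nil ih
      simp [hps]

theorem stripContSp_go (l : List Char) : ∀ (fuel : Nat) (cur : List Char) (acc : List (List Char)),
    l.length ≤ fuel →
    PySem.Chars.splitOn.go ['\n'] fuel l cur acc
      = acc.reverse ++ (stripContSp l).modifyHead (cur.reverse ++ ·) := by
  induction l with
  | nil =>
    intro fuel cur acc _
    cases fuel <;> simp [PySem.Chars.splitOn.go, stripContSp]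
  | cons c s ih =>
    intro fuel cur acc hfuel
    cases fuel with
    | zero => simp at hfuel
    | succ fuel =>
      by_cases hc : c = '\n'
      · subst hc
        have hpre : List.isPrefixOf ['\n'] ('\n' :: s) = true := by simp [List.isPrefixOf]
        simp only [PySem.Chars.splitOn.go, hpre, if_pos]
        rw [show List.drop (['\n'].length) ('\n' :: s) = s from rfl]
        rw [ih fuel [] (cur.reverse :: acc) (by simpa using Nat.le_of_succ_le_succ hfuel)]
        obtain ⟨p, ps, hps⟩ := List.exists_cons_of_ne_nil (stripContSp_ne_nil s)
        simp [stripContSp, hps]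
      · have hpre : List.isPrefixOf ['\n'] (c :: s) = false := by
          simp [List.isPrefixOf]; exact fun h => absurd h.symm hc
        simp only [PySem.Chars.splitOn.go, hpre]
        rw [if_neg (by simp), ih fuel (c :: cur) acc (by simpa using Nat.le_of_succ_le_succ hfuel)]
        obtain ⟨p, ps, hps⟩ := List.exists_cons_of_ne_nil (stripContSp_ne_nil s)
        simp [stripContSp, hc, hps]

theorem stripContSplitOn_eq (l : List Char) :
    PySem.Chars.splitOn l ['\n'] = stripContSp l := by
  unfold PySem.Chars.splitOn
  rw [stripContSp_go l (l.length + 1) [] [] (by omega)]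
  obtain ⟨p, ps, hps⟩ := List.exists_cons_of_ne_nil (stripContSp_ne_nil l)
  simp [hps]

-- A's per-line cleanup.
def stripContLine (line : List Char) : List Char :=
  if PySem.Chars.endswith line ['\\'] then PySem.Chars.slice line none (some (-1)) else line

theorem stripContLine_nil : stripContLine [] = [] := by
  simp [stripContLine, PySem.Chars.endswith, List.isSuffixOf]

theorem stripContLine_cons (c : Char) (p : List Char) (h : p ≠ [] ∨ c ≠ '\\') :
    stripContLine (c :: p) = c :: stripContLine p := by
  cases p with
  | nil =>
    have hc : c ≠ '\\' := h.resolve_left (by simp)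
    simp [stripContLine, PySem.Chars.endswith_iff, List.suffix_cons_iff, Ne.symm hc]
  | cons b t =>
    have hsuf : (PySem.Chars.endswith (c :: b :: t) ['\\'])
        = PySem.Chars.endswith (b :: t) ['\\'] := by
      by_cases hs : ('\\' :: []) <:+ (b :: t)
      · rw [(PySem.Chars.endswith_iff _ _).2 (hs.trans (List.suffix_cons c (b :: t))),
          (PySem.Chars.endswith_iff _ _).2 hs]
      · have hns : ¬ (('\\' :: []) <:+ (c :: b :: t)) := by
          rw [List.suffix_cons_iff]
          rintro (h1 | h2) <;> simp_all
        rw [Bool.eq_false_iff.mpr (fun h => hns ((PySem.Chars.endswith_iff _ _).1 h)),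
          Bool.eq_false_iff.mpr (fun h => hs ((PySem.Chars.endswith_iff _ _).1 h))]
    simp only [stripContLine, hsuf, PySem.Chars.slice_eq_listSlice, PySem.List.slice_to_neg_one]
    split_ifs <;> rfl

theorem stripContSp_head_nil (s : List Char) (_p : List Char) (ps : List (List Char))
    (h : stripContSp s = [] :: ps) : s = [] ∨ s.head? = some '\n' := by
  cases s with
  | nil => left; rfl
  | cons c t =>
    by_cases hc : c = '\n'
    · right; simp [hc]
    · exfalso
      obtain ⟨q, qs, hqs⟩ := List.exists_cons_of_ne_nil (stripContSp_ne_nil t)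
      simp [stripContSp, hc, hqs] at h

theorem stripCont_main (l : List Char) :
    PySem.Chars.join ['\n'] ((stripContSp l).map stripContLine) = stripContAltGo l := by
  induction l with
  | nil => simp [stripContSp, stripContLine, PySem.Chars.endswith, List.isSuffixOf,
      PySem.Chars.join_singleton, stripContAltGo]
  | cons c s ih =>
    obtain ⟨p, ps, hps⟩ := List.exists_cons_of_ne_nil (stripContSp_ne_nil s)
    by_cases hc : c = '\n'
    · subst hc
      have hline : stripContLine [] = [] := by
        simp [stripContLine, PySem.Chars.endswith, List.isSuffixOf]
      rw [show stripContSp ('\n' :: s) = [] :: stripContSp s from by simp [stripContSp]]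
      rw [hps] at ih ⊢
      simp only [List.map_cons, hline, PySem.Chars.join_cons_cons] at *
      rw [show stripContAltGo ('\n' :: s) = '\n' :: stripContAltGo s from by
        simp [stripContAltGo]]
      simpa using ih
    · rw [show stripContSp (c :: s) = (c :: p) :: ps from by simp [stripContSp, hc, hps]]
      rw [hps] at ih
      by_cases hdrop : c = '\\' ∧ (s = [] ∨ s.head? = some '\n')
      · -- the backslash is dropped on both sides; the current line piece p is empty
        have hp : p = [] := by
          rcases hdrop.2 with h0 | h1
          · subst h0; simp [stripContSp] at hps; exact hps.1
          · cases s with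
            | nil => simp at h1
            | cons b t =>
              have hb : b = '\n' := by simpa using h1
              subst hb; simp [stripContSp] at hps; exact hps.1
        subst hp
        have hline : stripContLine [c] = [] := by
          simp [stripContLine, PySem.Chars.endswith, List.isSuffixOf, hdrop.1,
            PySem.Chars.slice_eq_listSlice, PySem.List.slice_to_neg_one]
        rw [show stripContAltGo (c :: s) = stripContAltGo s from by
          simp [stripContAltGo, hdrop.1, hdrop.2]]
        rw [← ih]
        cases ps with
        | nil => simp [hline, stripContLine_nil, PySem.Chars.join_singleton]
        | cons q qs =>
          simp [hline, stripContLine_nil, PySem.Chars.join_cons_cons]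
      · -- the character is kept on both sides
        have hkeep : stripContLine (c :: p) = c :: stripContLine p := by
          apply stripContLine_cons
          by_cases hp : p = []
          · right
            intro hcb
            exact hdrop ⟨hcb, stripContSp_head_nil s p ps (hp ▸ hps)⟩
          · left; exact hp
        rw [show stripContAltGo (c :: s) = c :: stripContAltGo s from by
          simp only [stripContAltGo]; rw [if_neg hdrop]]
        rw [← ih]
        cases ps with
        | nil => simp [hkeep, PySem.Chars.join_singleton]
        | cons q qs =>
          simp [hkeep, PySem.Chars.join_cons_cons]

-- ===== VERDICT (by name: the statement is the Claim_ definition above) =====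
theorem strip_continuation_spec : Claim_equal_strip_continuation := by
  intro text _
  show strip_continuation text = strip_continuation_alt text
  show String.ofList (PySem.Chars.join ['\n']
      ((PySem.Chars.splitOn text.toList ['\n']).foldl
        (fun acc line => acc ++ [stripContLine line]) [])) = String.ofList (stripContAltGo text.toList)
  rw [PySem.List.foldl_append_singleton_eq_map stripContLine, stripContSplitOn_eq,
    List.nil_append, stripCont_main]
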